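-- pv_equiv track=rewrite | github.com/FZJ-IEK3-VSA/quinex-utils | src/quinex_utils/parsers/utils/ambigous_candidate_filters.py | ignore_duplicates_and_prioritize_successful_matches
-- ===== SOURCE A (Python) =====
-- def ignore_duplicates_and_prioritize_successful_matches(all_quantities, superstructure_types, superstructure_quantity_parts_):
--     """
--     Ignore duplicates and prioritize candidates that could already be
--     successfully parsed and have a known superstructure type.
--     """
--     unique_matches = []
--     unique_successful_matches = []
--     unique_successful_and_known_matches = []
--     unique_known_matches = []
--     for q, s, p in zip(all_quantities, superstructure_types, superstructure_quantity_parts_):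
--         # Only keep unique matches.
--         if (q, s, p) not in unique_matches:
--             unique_matches.append((q, s, p))
--             if None not in p:
--                 # Until now quantity was successfully parsed.
--                 unique_successful_matches.append((q, s, p))
--                 if s != "unknown":
--                     # Until now quantity was successfully parsed and its type is known.
--                     unique_successful_and_known_matches.append((q, s, p))
--             elif s != "unknown":
--                 # Quantity could not yet be successfully parsed, but its type is known.
--                 unique_known_matches.append((q, s, p))
--
--     if len(unique_successful_and_known_matches) > 0:
--         # Prio 1: prioritize successfully parsed matches with known superstructure.
--         filtered_matches = unique_successful_and_known_matches
--     elif len(unique_successful_matches) > 0: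
--         # Prio 2: prioritize successfully parsed matches.
--         filtered_matches = unique_successful_matches
--     elif len(unique_known_matches) > 0:
--         # Prio 3: prioritize matches with known superstructure.
--         filtered_matches = unique_known_matches
--     else:
--         filtered_matches = unique_matches
--
--     all_quantities, superstructure_types, superstructure_quantity_parts_ = [list(t) for t in zip(*filtered_matches)]
--
--     return all_quantities, superstructure_types, superstructure_quantity_parts_
-- ===== SOURCE B (Python) =====
-- def ignore_duplicates_and_prioritize_successful_matches(all_quantities, superstructure_types, superstructure_quantity_parts_):
--     """
--     Ignore duplicates and prioritize candidates that could already be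
--     successfully parsed and have a known superstructure type.
--     """
--     def rank(s, p):
--         # 0 = parsed & known, 1 = parsed, 2 = known, 3 = neither.
--         if None in p:
--             return 2 if s != "unknown" else 3
--         return 0 if s != "unknown" else 1
--
--     unique_matches = [(q, s, list(p)) for q, s, p in dict.fromkeys(
--         (q, s, tuple(p)) for q, s, p in
--         zip(all_quantities, superstructure_types, superstructure_quantity_parts_))]
--     best = min(rank(s, p) for _, s, p in unique_matches)
--     filtered_matches = [t for t in unique_matches if rank(t[1], t[2]) == best]
--     all_quantities, superstructure_types, superstructure_quantity_parts_ = [list(t) for t in zip(*filtered_matches)]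
--     return all_quantities, superstructure_types, superstructure_quantity_parts_
-- ===== Notes on version B (the rewrite author's own statement) =====
-- stated objective: alternative
-- what changed: Replaces A's four incrementally-maintained accumulator lists and if/elif tier chain with a numeric priority rank (0-3) per triple: dedupe once via dict.fromkeys, take the minimum rank, and keep exactly the triples achieving it.
import Mathlib
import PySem

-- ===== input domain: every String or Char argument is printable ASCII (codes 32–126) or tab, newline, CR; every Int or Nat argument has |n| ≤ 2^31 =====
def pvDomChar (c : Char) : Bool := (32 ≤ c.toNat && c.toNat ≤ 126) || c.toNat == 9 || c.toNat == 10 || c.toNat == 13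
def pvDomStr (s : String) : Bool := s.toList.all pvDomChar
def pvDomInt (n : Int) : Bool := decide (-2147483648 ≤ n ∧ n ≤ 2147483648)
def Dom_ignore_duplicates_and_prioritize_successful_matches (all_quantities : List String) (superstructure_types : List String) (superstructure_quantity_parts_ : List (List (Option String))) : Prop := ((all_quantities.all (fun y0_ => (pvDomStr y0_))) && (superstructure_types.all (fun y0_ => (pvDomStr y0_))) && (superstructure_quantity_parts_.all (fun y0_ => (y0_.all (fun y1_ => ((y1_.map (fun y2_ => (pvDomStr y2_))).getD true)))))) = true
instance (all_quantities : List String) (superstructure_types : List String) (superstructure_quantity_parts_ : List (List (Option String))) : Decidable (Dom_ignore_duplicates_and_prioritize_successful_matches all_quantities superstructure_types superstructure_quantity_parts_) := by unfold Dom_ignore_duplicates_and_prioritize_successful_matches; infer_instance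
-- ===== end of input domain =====

-- B (objective: alternative): instead of A's four accumulator lists filled inside the
-- dedup loop and an if/elif tier chain, B assigns each triple a numeric priority rank
-- (0-3), dedupes once (dict.fromkeys), and keeps exactly the triples of minimum rank.

-- shared helper: Python's zip(a, b, c) over three lists (used by both sources)
def pvZip3 (a b : List String) (c : List (List (Option String))) :
    List (String × String × List (Option String)) :=
  match a, b, c with
  | q :: a, s :: b, p :: c => (q, s, p) :: pvZip3 a b c
  | _, _, _ => []

-- shared helper: the final '[list(t) for t in zip(*filtered_matches)]' unpacked into
-- three lists (both sources end with this exact line); total — the empty case, where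
-- Python raises ValueError, is excluded by Pre_.
def pvUnzip3 (l : List (String × String × List (Option String))) :
    List String × List String × List (List (Option String)) :=
  (l.map (·.1), l.map (·.2.1), l.map (·.2.2))

-- ===== PORT A =====
-- A's single loop maintaining the four accumulator lists
def pvLoopA (l : List (String × String × List (Option String)))
    (u us usk uk : List (String × String × List (Option String))) :
    List (String × String × List (Option String)) × List (String × String × List (Option String)) ×
    List (String × String × List (Option String)) × List (String × String × List (Option String)) :=
  match l with
  | [] => (u, us, usk, uk)
  | (q, s, p) :: rest =>
    if (q, s, p) ∈ u then
      pvLoopA rest u us usk uk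
    else
      if none ∉ p then
        if s ≠ "unknown" then
          pvLoopA rest (u ++ [(q, s, p)]) (us ++ [(q, s, p)]) (usk ++ [(q, s, p)]) uk
        else
          pvLoopA rest (u ++ [(q, s, p)]) (us ++ [(q, s, p)]) usk uk
      else if s ≠ "unknown" then
        pvLoopA rest (u ++ [(q, s, p)]) us usk (uk ++ [(q, s, p)])
      else
        pvLoopA rest (u ++ [(q, s, p)]) us usk uk

def ignore_duplicates_and_prioritize_successful_matches (all_quantities : List String) (superstructure_types : List String) (superstructure_quantity_parts_ : List (List (Option String))) : List String × List String × List (List (Option String)) :=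
  let r := pvLoopA (pvZip3 all_quantities superstructure_types superstructure_quantity_parts_) [] [] [] []
  let unique_matches := r.1
  let unique_successful_matches := r.2.1
  let unique_successful_and_known_matches := r.2.2.1
  let unique_known_matches := r.2.2.2
  let filtered_matches :=
    if unique_successful_and_known_matches.length > 0 then unique_successful_and_known_matches
    else if unique_successful_matches.length > 0 then unique_successful_matches
    else if unique_known_matches.length > 0 then unique_known_matches
    else unique_matches
  pvUnzip3 filtered_matches

-- ===== PORT B =====
-- B's priority rank: 0 = parsed & known, 1 = parsed, 2 = known, 3 = neither.
def pvRank (s : String) (p : List (Option String)) : Int :=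
  if none ∈ p then (if s ≠ "unknown" then 2 else 3)
  else (if s ≠ "unknown" then 0 else 1)

def ignore_duplicates_and_prioritize_successful_matches_alt (all_quantities : List String) (superstructure_types : List String) (superstructure_quantity_parts_ : List (List (Option String))) : List String × List String × List (List (Option String)) :=
  -- dict.fromkeys over the zipped triples = ordered dedup (first occurrences)
  let unique_matches := PySem.List.dedup (pvZip3 all_quantities superstructure_types superstructure_quantity_parts_)
  -- best = min(rank(s, p) for _, s, p in unique_matches); min([]) raises (outside Pre_)
  match PySem.List.min? (unique_matches.map (fun t => pvRank t.2.1 t.2.2)) (fun x => x) with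
  | some best => pvUnzip3 (unique_matches.filter (fun t => pvRank t.2.1 t.2.2 == best))
  | none => ([], [], [])

-- ===== PRECONDITION & SPEC =====
-- Pre_ excludes exactly the inputs where any argument list is empty: zip is then empty
-- and A's final unpacking of zip(*[]) raises ValueError (B's min([]) raises there too).
def Pre_ignore_duplicates_and_prioritize_successful_matches (all_quantities : List String) (superstructure_types : List String) (superstructure_quantity_parts_ : List (List (Option String))) : Prop :=
  all_quantities ≠ [] ∧ superstructure_types ≠ [] ∧ superstructure_quantity_parts_ ≠ []
instance (all_quantities : List String) (superstructure_types : List String) (superstructure_quantity_parts_ : List (List (Option String))) : Decidable (Pre_ignore_duplicates_and_prioritize_successful_matches all_quantities superstructure_types superstructure_quantity_parts_) := by unfold Pre_ignore_duplicates_and_prioritize_successful_matches; infer_instance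

def pvWitness_ignore_duplicates_and_prioritize_successful_matches : List String × List String × List (List (Option String)) :=
  (["5 m"], ["length"], [[some "5"]])

def Spec_ignore_duplicates_and_prioritize_successful_matches (all_quantities : List String) (superstructure_types : List String) (superstructure_quantity_parts_ : List (List (Option String))) (out : List String × List String × List (List (Option String))) : Prop := out = ignore_duplicates_and_prioritize_successful_matches_alt all_quantities superstructure_types superstructure_quantity_parts_
instance (all_quantities : List String) (superstructure_types : List String) (superstructure_quantity_parts_ : List (List (Option String))) (out : List String × List String × List (List (Option String))) : Decidable (Spec_ignore_duplicates_and_prioritize_successful_matches all_quantities superstructure_types superstructure_quantity_parts_ out) := by unfold Spec_ignore_duplicates_and_prioritize_successful_matches; infer_instance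

-- ===== CLAIM (what is proved, stated in full; the proofs are below) =====
def Claim_equal_ignore_duplicates_and_prioritize_successful_matches : Prop := ∀ (all_quantities : List String) (superstructure_types : List String) (superstructure_quantity_parts_ : List (List (Option String))), Dom_ignore_duplicates_and_prioritize_successful_matches all_quantities superstructure_types superstructure_quantity_parts_ → Pre_ignore_duplicates_and_prioritize_successful_matches all_quantities superstructure_types superstructure_quantity_parts_ → Spec_ignore_duplicates_and_prioritize_successful_matches all_quantities superstructure_types superstructure_quantity_parts_ (ignore_duplicates_and_prioritize_successful_matches all_quantities superstructure_types superstructure_quantity_parts_)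

-- ===== LEMMAS AND PROOFS =====

-- rank characterizations
theorem pvRank_eq_zero (s : String) (p : List (Option String)) :
    pvRank s p = 0 ↔ (none ∉ p ∧ s ≠ "unknown") := by
  unfold pvRank; split_ifs <;> simp_all
theorem pvRank_eq_one (s : String) (p : List (Option String)) :
    pvRank s p = 1 ↔ (none ∉ p ∧ s = "unknown") := by
  unfold pvRank; split_ifs <;> simp_all
theorem pvRank_eq_two (s : String) (p : List (Option String)) :
    pvRank s p = 2 ↔ (none ∈ p ∧ s ≠ "unknown") := by
  unfold pvRank; split_ifs <;> simp_all
theorem pvRank_eq_three (s : String) (p : List (Option String)) :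
    pvRank s p = 3 ↔ (none ∈ p ∧ s = "unknown") := by
  unfold pvRank; split_ifs <;> simp_all
theorem pvRank_cases (s : String) (p : List (Option String)) :
    pvRank s p = 0 ∨ pvRank s p = 1 ∨ pvRank s p = 2 ∨ pvRank s p = 3 := by
  unfold pvRank; split_ifs <;> simp

-- A's loop, started from a deduped prefix u and its three filtered views, computes
-- the ordered dedup (Set.update u l) and its three filtered views.
theorem pvLoopA_eq_filters (l : List (String × String × List (Option String)))
    (u : List (String × String × List (Option String))) :
    pvLoopA l u
      (u.filter (fun t => decide (none ∉ t.2.2)))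
      (u.filter (fun t => decide (none ∉ t.2.2 ∧ t.2.1 ≠ "unknown")))
      (u.filter (fun t => decide (none ∈ t.2.2 ∧ t.2.1 ≠ "unknown"))) =
    (PySem.Set.update u l,
     (PySem.Set.update u l).filter (fun t => decide (none ∉ t.2.2)),
     (PySem.Set.update u l).filter (fun t => decide (none ∉ t.2.2 ∧ t.2.1 ≠ "unknown")),
     (PySem.Set.update u l).filter (fun t => decide (none ∈ t.2.2 ∧ t.2.1 ≠ "unknown"))) := by
  induction l generalizing u with
  | nil => simp [pvLoopA, PySem.Set.update]
  | cons t rest ih =>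
    obtain ⟨q, s, p⟩ := t
    have hupd : PySem.Set.update u ((q, s, p) :: rest) =
        PySem.Set.update (PySem.Set.add u (q, s, p)) rest := by
      simp [PySem.Set.update]
    by_cases hm : (q, s, p) ∈ u
    · have hadd : PySem.Set.add u (q, s, p) = u := by
        simp [PySem.Set.add, hm]
      rw [pvLoopA, if_pos hm, hupd, hadd]
      exact ih u
    · have hadd : PySem.Set.add u (q, s, p) = u ++ [(q, s, p)] :=
        PySem.Set.add_of_not_mem hm
      rw [pvLoopA, if_neg hm, hupd, hadd]
      by_cases hp : none ∈ p <;> by_cases hs : s = "unknown" <;>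
        simp only [hp, hs, if_true, if_false, not_true, not_false_iff, ne_eq] <;>
      · have := ih (u ++ [(q, s, p)])
        rw [List.filter_append, List.filter_append, List.filter_append] at this
        simpa [hp, hs] using this

-- A's if/elif tier chain equals filtering by the minimum rank.
theorem tier_eq_min_filter (U : List (String × String × List (Option String)))
    (b : Int)
    (hb : ∃ t ∈ U, pvRank t.2.1 t.2.2 = b)
    (hmin : ∀ t ∈ U, b ≤ pvRank t.2.1 t.2.2) :
    (if (U.filter (fun t => decide (none ∉ t.2.2 ∧ t.2.1 ≠ "unknown"))).length > 0 then
        U.filter (fun t => decide (none ∉ t.2.2 ∧ t.2.1 ≠ "unknown"))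
     else if (U.filter (fun t => decide (none ∉ t.2.2))).length > 0 then
        U.filter (fun t => decide (none ∉ t.2.2))
     else if (U.filter (fun t => decide (none ∈ t.2.2 ∧ t.2.1 ≠ "unknown"))).length > 0 then
        U.filter (fun t => decide (none ∈ t.2.2 ∧ t.2.1 ≠ "unknown"))
     else U) =
    U.filter (fun t => pvRank t.2.1 t.2.2 == b) := by
  obtain ⟨t0, ht0, hr0⟩ := hb
  rcases pvRank_cases t0.2.1 t0.2.2 with h0 | h1 | h2 | h3
  · -- b = 0: the successful-and-known tier is nonempty and equals the rank-0 filter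
    have hb0 : b = 0 := by omega
    subst hb0
    have hmem : t0 ∈ U.filter (fun t => decide (none ∉ t.2.2 ∧ t.2.1 ≠ "unknown")) :=
      List.mem_filter.mpr ⟨ht0, by simpa using (pvRank_eq_zero _ _).mp h0⟩
    rw [if_pos (by exact List.length_pos_of_mem hmem)]
    refine List.filter_congr ?_
    intro t ht
    rw [Bool.eq_iff_iff]; simp only [decide_eq_true_eq, beq_iff_eq]
    rw [← pvRank_eq_zero]
  · -- b = 1: no rank-0 element; tier 2 (successful) is chosen and equals the rank-1 filter
    have hb1 : b = 1 := by omega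
    subst hb1
    have hno0 : ∀ t ∈ U, pvRank t.2.1 t.2.2 ≠ 0 := fun t ht h => by
      have := hmin t ht; omega
    have hf1 : U.filter (fun t => decide (none ∉ t.2.2 ∧ t.2.1 ≠ "unknown")) = [] := by
      rw [List.filter_eq_nil_iff]
      intro t ht
      simp only [decide_eq_true_eq]
      rw [← pvRank_eq_zero]
      exact hno0 t ht
    have hmem : t0 ∈ U.filter (fun t => decide (none ∉ t.2.2)) :=
      List.mem_filter.mpr ⟨ht0, by simpa using ((pvRank_eq_one _ _).mp h1).1⟩
    rw [hf1, if_neg (by decide)]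
    rw [if_pos (by exact List.length_pos_of_mem hmem)]
    refine List.filter_congr ?_
    intro t ht
    rw [Bool.eq_iff_iff]; simp only [decide_eq_true_eq, beq_iff_eq]
    constructor
    · intro hnp
      rcases pvRank_cases t.2.1 t.2.2 with g0 | g1 | g2 | g3
      · exact absurd g0 (hno0 t ht)
      · exact g1
      · exact absurd hnp (by simpa using ((pvRank_eq_two _ _).mp g2).1)
      · exact absurd hnp (by simpa using ((pvRank_eq_three _ _).mp g3).1)
    · intro hr; exact ((pvRank_eq_one _ _).mp hr).1
  · -- b = 2: all ranks ≥ 2, so the first two tiers are empty; known tier = rank-2 filter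
    have hb2 : b = 2 := by omega
    subst hb2
    have hge : ∀ t ∈ U, none ∈ t.2.2 := by
      intro t ht
      rcases pvRank_cases t.2.1 t.2.2 with g0 | g1 | g2 | g3
      · have := hmin t ht; omega
      · have := hmin t ht; omega
      · exact ((pvRank_eq_two _ _).mp g2).1
      · exact ((pvRank_eq_three _ _).mp g3).1
    have hf1 : U.filter (fun t => decide (none ∉ t.2.2 ∧ t.2.1 ≠ "unknown")) = [] := by
      rw [List.filter_eq_nil_iff]
      intro t ht
      simp [hge t ht]
    have hf2 : U.filter (fun t => decide (none ∉ t.2.2)) = [] := by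
      rw [List.filter_eq_nil_iff]
      intro t ht
      simp [hge t ht]
    have hmem : t0 ∈ U.filter (fun t => decide (none ∈ t.2.2 ∧ t.2.1 ≠ "unknown")) :=
      List.mem_filter.mpr ⟨ht0, by simpa using (pvRank_eq_two _ _).mp h2⟩
    rw [hf1, if_neg (by decide), hf2, if_neg (by decide)]
    rw [if_pos (by exact List.length_pos_of_mem hmem)]
    refine List.filter_congr ?_
    intro t ht
    rw [Bool.eq_iff_iff]; simp only [decide_eq_true_eq, beq_iff_eq]
    rw [← pvRank_eq_two]
  · -- b = 3: every element has rank 3, all three tiers are empty and the filter keeps all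
    have hb3 : b = 3 := by omega
    subst hb3
    have hall : ∀ t ∈ U, pvRank t.2.1 t.2.2 = 3 := by
      intro t ht
      rcases pvRank_cases t.2.1 t.2.2 with g0 | g1 | g2 | g3 <;>
        · have := hmin t ht; omega
    have hf1 : U.filter (fun t => decide (none ∉ t.2.2 ∧ t.2.1 ≠ "unknown")) = [] := by
      rw [List.filter_eq_nil_iff]
      intro t ht
      have := (pvRank_eq_three _ _).mp (hall t ht)
      simp [this.1]
    have hf2 : U.filter (fun t => decide (none ∉ t.2.2)) = [] := by
      rw [List.filter_eq_nil_iff]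
      intro t ht
      have := (pvRank_eq_three _ _).mp (hall t ht)
      simp [this.1]
    have hf3 : U.filter (fun t => decide (none ∈ t.2.2 ∧ t.2.1 ≠ "unknown")) = [] := by
      rw [List.filter_eq_nil_iff]
      intro t ht
      have := (pvRank_eq_three _ _).mp (hall t ht)
      simp [this.1, this.2]
    rw [hf1, if_neg (by decide), hf2, if_neg (by decide), hf3, if_neg (by decide)]
    rw [List.filter_eq_self.mpr (fun t ht => by simp [hall t ht])]

-- dict.fromkeys dedup = the accumulator-dedup A's loop performs
theorem dedup_eq_update (l : List (String × String × List (Option String))) :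
    PySem.List.dedup l = PySem.Set.update [] l := by
  simp [PySem.List.dedup_eq_ofList]
  rfl

theorem pvZip3_ne_nil (a b : List String) (c : List (List (Option String)))
    (ha : a ≠ []) (hb : b ≠ []) (hc : c ≠ []) : pvZip3 a b c ≠ [] := by
  cases a with
  | nil => exact absurd rfl ha
  | cons x a => cases b with
    | nil => exact absurd rfl hb
    | cons y b => cases c with
      | nil => exact absurd rfl hc
      | cons z c => simp [pvZip3]

-- ===== VERDICT (by name: the statement is the Claim_ definition above) =====
theorem ignore_duplicates_and_prioritize_successful_matches_spec : Claim_equal_ignore_duplicates_and_prioritize_successful_matches := by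
  intro a b c _ hpre
  obtain ⟨ha, hb, hc⟩ := hpre
  show _ = _
  unfold ignore_duplicates_and_prioritize_successful_matches
    ignore_duplicates_and_prioritize_successful_matches_alt
  have hlne : pvZip3 a b c ≠ [] := pvZip3_ne_nil a b c ha hb hc
  have hUne : PySem.Set.update [] (pvZip3 a b c) ≠ [] := by
    obtain ⟨x, r, hxr⟩ := List.exists_cons_of_ne_nil hlne
    have hx : x ∈ PySem.List.dedup (pvZip3 a b c) :=
      (PySem.List.mem_dedup _ _).mpr (by rw [hxr]; simp)
    rw [dedup_eq_update] at hx
    exact List.ne_nil_of_mem hx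
  have hRne : (PySem.Set.update [] (pvZip3 a b c)).map (fun t => pvRank t.2.1 t.2.2) ≠ [] := by
    simpa using hUne
  obtain ⟨bmin, hbmin⟩ : ∃ bmin,
      PySem.List.min? ((PySem.Set.update [] (pvZip3 a b c)).map (fun t => pvRank t.2.1 t.2.2))
        (fun x => x) = some bmin := by
    cases h : PySem.List.min? ((PySem.Set.update [] (pvZip3 a b c)).map (fun t => pvRank t.2.1 t.2.2))
        (fun x => x) with
    | none => exact absurd ((PySem.List.min?_eq_none_iff _ _).mp h) hRne
    | some v => exact ⟨v, rfl⟩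
  have hbmem : ∃ t ∈ PySem.Set.update [] (pvZip3 a b c), pvRank t.2.1 t.2.2 = bmin := by
    obtain ⟨t, ht, heq⟩ := List.mem_map.mp (PySem.List.min?_mem hbmin)
    exact ⟨t, ht, heq⟩
  have hble : ∀ t ∈ PySem.Set.update [] (pvZip3 a b c), bmin ≤ pvRank t.2.1 t.2.2 := by
    intro t ht
    exact PySem.List.min?_isMin hbmin _ (List.mem_map.mpr ⟨t, ht, rfl⟩)
  have hA := pvLoopA_eq_filters (pvZip3 a b c) []
  simp only [List.filter_nil] at hA
  simp only [hA, dedup_eq_update, hbmin]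
  exact congrArg pvUnzip3
    (tier_eq_min_filter (PySem.Set.update [] (pvZip3 a b c)) bmin hbmem hble)
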